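-- pv_equiv track=rewrite | github.com/feureau/Small-Scripts | Programming/folderize.py | normalize_metadata_dict
-- ===== SOURCE A (Python) =====
-- def normalize_metadata_dict(d):
--     """Flattens common metadata fields into a compact dict with consistent keys."""
--     if not d: return {}
--
--     def pick(src, keys):
--         for k in keys:
--             for kk in src.keys():
--                 if kk.lower() == k.lower():
--                     v = src.get(kk)
--                     if v not in (None, "", []): return v
--         return None
--
--     out = {}
--     out["title"] = pick(d, ["TrackName", "Track name", "Title"])
--     out["album"] = pick(d, ["Album"])
--     out["track"] = pick(d, ["Track", "TrackPosition", "TrackNumber", "Track name/Position"])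
--     out["artist"] = pick(d, ["Performer", "Artist", "AlbumArtist", "Author"])
--     out["genre"] = pick(d, ["Genre"])
--     out["year"] = pick(d, ["RecordedDate", "Year", "Date", "DateCreated", "OriginalReleaseDate"])
--     out["comment"] = pick(d, ["Comment"])
--     out["format"] = pick(d, ["Format", "FormatName", "FileType"])
--     out["duration"] = pick(d, ["Duration", "DurationString"])
--     out["bitrate"] = pick(d, ["OverallBitRate", "BitRate"])
--     out["cover"] = pick(d, ["Cover", "CoverType", "CoverMime", "Picture", "PictureMimeType"])
--     out["source_tool"] = pick(d, ["_source_tool"])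
--
--     # Remove empties
--     return {k: v for k, v in out.items() if v not in (None, "", [], {})}
-- ===== SOURCE B (Python) =====
-- FIELDS = [
--     ("title", ["TrackName", "Track name", "Title"]),
--     ("album", ["Album"]),
--     ("track", ["Track", "TrackPosition", "TrackNumber", "Track name/Position"]),
--     ("artist", ["Performer", "Artist", "AlbumArtist", "Author"]),
--     ("genre", ["Genre"]),
--     ("year", ["RecordedDate", "Year", "Date", "DateCreated", "OriginalReleaseDate"]),
--     ("comment", ["Comment"]),
--     ("format", ["Format", "FormatName", "FileType"]),
--     ("duration", ["Duration", "DurationString"]),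
--     ("bitrate", ["OverallBitRate", "BitRate"]),
--     ("cover", ["Cover", "CoverType", "CoverMime", "Picture", "PictureMimeType"]),
--     ("source_tool", ["_source_tool"]),
-- ]
--
-- # Reverse index: lowercase candidate key -> (output field, candidate rank).
-- REV = {c.lower(): (name, rank) for name, cands in FIELDS for rank, c in enumerate(cands)}
--
--
-- def normalize_metadata_dict(d):
--     """Flattens common metadata fields into a compact dict with consistent keys."""
--     # Inverted traversal: one pass over the data; classify each entry via the
--     # reverse index and keep, per field, the value of smallest candidate rank
--     # (earliest entry wins ties), instead of scanning the data per candidate.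
--     best = {}  # field -> (rank, value)
--     for k, v in d.items():
--         if v in (None, "", []):
--             continue
--         hit = REV.get(k.lower())
--         if hit is None:
--             continue
--         name, rank = hit
--         if name not in best or rank < best[name][0]:
--             best[name] = (rank, v)
--     return {name: best[name][1] for name, _ in FIELDS if name in best}
-- ===== Notes on version B (the rewrite author's own statement) =====
-- stated objective: faster
-- what changed: B inverts the traversal: instead of A's per-field, per-candidate rescans of the data's keys, B makes a single pass over the data, classifies each entry through a precomputed reverse index (lowercase candidate -> field, rank) and keeps per field the smallest-rank (earliest on ties) non-empty value, then emits the fields in order.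
import Mathlib
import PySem

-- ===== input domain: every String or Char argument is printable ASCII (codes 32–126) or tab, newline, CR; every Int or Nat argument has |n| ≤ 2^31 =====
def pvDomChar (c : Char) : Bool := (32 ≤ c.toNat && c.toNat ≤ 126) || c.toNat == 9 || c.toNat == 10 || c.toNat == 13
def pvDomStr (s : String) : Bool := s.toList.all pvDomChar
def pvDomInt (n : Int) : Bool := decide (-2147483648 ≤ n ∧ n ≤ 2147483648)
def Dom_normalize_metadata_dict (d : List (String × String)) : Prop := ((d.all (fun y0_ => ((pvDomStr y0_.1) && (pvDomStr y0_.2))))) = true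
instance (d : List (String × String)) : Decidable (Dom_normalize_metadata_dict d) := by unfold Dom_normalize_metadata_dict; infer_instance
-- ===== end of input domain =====

-- B inverts A's traversal: instead of scanning the data once per candidate key of every
-- field, B makes ONE pass over the data, classifies each entry through a precomputed
-- reverse index (lowercase candidate -> field, rank) and keeps per field the value of
-- smallest candidate rank (earliest entry wins ties). Objective: alternative/faster.

-- Both ports receive the Python dict as its items list; pvDictOf rebuilds the dict
-- (insertion order, overwrite in place) — shared input decoding, not part of either algorithm.
def pvDictOf (d : List (String × String)) : PySem.Dict String String :=
  d.foldl (fun acc p => acc.insert p.1 p.2) PySem.Dict.empty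

-- ===== PORT A =====
-- inner loop of A's pick: 'for kk in src.keys(): if kk.lower() == k.lower(): v = src.get(kk); if v not in (None,"",[]): return v'
def pvPickScan (src : PySem.Dict String String) (lk : String) : List String → Option String
  | [] => none
  | kk :: rest =>
    if PySem.Str.lower kk = lk then
      if src.getD kk "" ≠ "" then some (src.getD kk "") else pvPickScan src lk rest
    else pvPickScan src lk rest

-- outer loop of A's pick: 'for k in keys: …'
def pvPick (src : PySem.Dict String String) : List String → Option String
  | [] => none
  | k :: rest =>
    match pvPickScan src (PySem.Str.lower k) src.keys with
    | some v => some v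
    | none => pvPick src rest

def normalize_metadata_dict (d : List (String × String)) : List (String × String) :=
  if d = [] then []
  else
    let src := pvDictOf d
    let out : List (String × Option String) :=
      [("title", pvPick src ["TrackName", "Track name", "Title"]),
       ("album", pvPick src ["Album"]),
       ("track", pvPick src ["Track", "TrackPosition", "TrackNumber", "Track name/Position"]),
       ("artist", pvPick src ["Performer", "Artist", "AlbumArtist", "Author"]),
       ("genre", pvPick src ["Genre"]),
       ("year", pvPick src ["RecordedDate", "Year", "Date", "DateCreated", "OriginalReleaseDate"]),
       ("comment", pvPick src ["Comment"]),
       ("format", pvPick src ["Format", "FormatName", "FileType"]),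
       ("duration", pvPick src ["Duration", "DurationString"]),
       ("bitrate", pvPick src ["OverallBitRate", "BitRate"]),
       ("cover", pvPick src ["Cover", "CoverType", "CoverMime", "Picture", "PictureMimeType"]),
       ("source_tool", pvPick src ["_source_tool"])]
    -- '{k: v for k, v in out.items() if v not in (None, "", [], {})}'
    out.filterMap (fun p => match p.2 with
      | some v => if v ≠ "" then some (p.1, v) else none
      | none => none)

-- ===== PORT B =====
def pvFields : List (String × List String) :=
  [("title", ["TrackName", "Track name", "Title"]),
   ("album", ["Album"]),
   ("track", ["Track", "TrackPosition", "TrackNumber", "Track name/Position"]),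
   ("artist", ["Performer", "Artist", "AlbumArtist", "Author"]),
   ("genre", ["Genre"]),
   ("year", ["RecordedDate", "Year", "Date", "DateCreated", "OriginalReleaseDate"]),
   ("comment", ["Comment"]),
   ("format", ["Format", "FormatName", "FileType"]),
   ("duration", ["Duration", "DurationString"]),
   ("bitrate", ["OverallBitRate", "BitRate"]),
   ("cover", ["Cover", "CoverType", "CoverMime", "Picture", "PictureMimeType"]),
   ("source_tool", ["_source_tool"])]

-- Source B's REV comprehension: lowercase candidate -> (field name, candidate rank)
def pvRevD : PySem.Dict String (String × Int) :=
  pvFields.foldl (fun acc f =>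
    (PySem.List.enumerate f.2).foldl (fun a e => a.insert (PySem.Str.lower e.2) (f.1, e.1)) acc)
    PySem.Dict.empty

-- Source B's loop body: skip empty values, classify via REV, keep the smaller rank (first wins ties)
def pvBStep (best : PySem.Dict String (Int × String)) (p : String × String) :
    PySem.Dict String (Int × String) :=
  if p.2 = "" then best
  else
    match pvRevD.get? (PySem.Str.lower p.1) with
    | none => best
    | some nr =>
      match best.get? nr.1 with
      | none => best.insert nr.1 (nr.2, p.2)
      | some rv => if nr.2 < rv.1 then best.insert nr.1 (nr.2, p.2) else best

def normalize_metadata_dict_alt (d : List (String × String)) : List (String × String) :=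
  let best := (pvDictOf d).items.foldl pvBStep PySem.Dict.empty
  -- '{name: best[name][1] for name, _ in FIELDS if name in best}'
  pvFields.filterMap (fun f => (best.get? f.1).map (fun rv => (f.1, rv.2)))

-- ===== PRECONDITION & SPEC =====
def Spec_normalize_metadata_dict (d : List (String × String)) (out : List (String × String)) : Prop := out = normalize_metadata_dict_alt d
instance (d : List (String × String)) (out : List (String × String)) : Decidable (Spec_normalize_metadata_dict d out) := by unfold Spec_normalize_metadata_dict; infer_instance

-- ===== CLAIM (what is proved, stated in full; the proofs are below) =====
def Claim_equal_normalize_metadata_dict : Prop := ∀ (d : List (String × String)), Dom_normalize_metadata_dict d → Spec_normalize_metadata_dict d (normalize_metadata_dict d)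

-- ===== LEMMAS AND PROOFS =====

-- proof-side characterisation of A's inner scan: first pair of xs whose lowercased key is lk
-- and whose value is non-empty
def pvScanI (lk : String) : List (String × String) → Option String
  | [] => none
  | p :: rest => if PySem.Str.lower p.1 = lk ∧ p.2 ≠ "" then some p.2 else pvScanI lk rest

-- first candidate (by rank, starting at i) whose lowercase equals lk
def pvScanIdx (lk : String) (i : Int) : List String → Option Int
  | [] => none
  | c :: rest => if PySem.Str.lower c = lk then some i else pvScanIdx lk (i + 1) rest

-- A's pick with the winning candidate rank attached
def pvPickR (xs : List (String × String)) (i : Int) : List String → Option (Int × String)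
  | [] => none
  | k :: rest =>
    match pvScanI (PySem.Str.lower k) xs with
    | some v => some (i, v)
    | none => pvPickR xs (i + 1) rest

-- B's reverse-index hit restricted to one field
def pvFieldHit (name lk : String) : Option Int :=
  match pvRevD.get? lk with
  | some nr => if nr.1 = name then some nr.2 else none
  | none => none

-- B's fold step projected onto one field
def pvOStep (name : String) (o : Option (Int × String)) (p : String × String) :
    Option (Int × String) :=
  if p.2 = "" then o
  else
    match pvFieldHit name (PySem.Str.lower p.1) with
    | none => o
    | some r =>
      match o with
      | none => some (r, p.2)
      | some rv => if r < rv.1 then some (r, p.2) else o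

-- keep the entry of smaller rank; the left (earlier) one wins ties
def pvOCombine (o1 o2 : Option (Int × String)) : Option (Int × String) :=
  match o2 with
  | none => o1
  | some rv2 =>
    match o1 with
    | none => o2
    | some rv1 => if rv2.1 < rv1.1 then o2 else o1

theorem pvDictOf_nodup (d : List (String × String)) : (pvDictOf d).keys.Nodup := by
  exact PySem.Dict.nodup_keys_foldl_insert_key d (·.1) (fun _ p => p.2) PySem.Dict.empty
    PySem.Dict.nodup_keys_empty

theorem pickScan_eq_scanI (src : PySem.Dict String String) (lk : String)
    (hnd : src.keys.Nodup) (xs : List (String × String)) (hsub : ∀ p ∈ xs, p ∈ src.items) :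
    pvPickScan src lk (xs.map (·.1)) = pvScanI lk xs := by
  induction xs with
  | nil => rfl
  | cons p xs ih =>
    have hmem : (p.1, p.2) ∈ src.items := hsub p (List.mem_cons_self ..)
    have hget : src.getD p.1 "" = p.2 := PySem.Dict.getD_of_mem_items _ hmem hnd ""
    have ih' := ih (fun q hq => hsub q (List.mem_cons_of_mem _ hq))
    simp only [List.map_cons, pvPickScan, pvScanI, hget]
    by_cases hl : PySem.Str.lower p.1 = lk
    · by_cases hv : p.2 ≠ ""
      · rw [if_pos hl, if_pos hv, if_pos ⟨hl, hv⟩]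
      · rw [if_pos hl, if_neg hv, if_neg (by tauto), ih']
    · rw [if_neg hl, if_neg (by tauto), ih']

-- A's pick equals the rank-annotated pick, value part
theorem pick_eq_pickR (src : PySem.Dict String String) (hnd : src.keys.Nodup) :
    ∀ (ks : List String) (i : Int),
      pvPick src ks = Option.map Prod.snd (pvPickR src.items i ks) := by
  intro ks
  induction ks with
  | nil => intro i; rfl
  | cons k rest ih =>
    intro i
    have hscan : pvPickScan src (PySem.Str.lower k) src.keys
        = pvScanI (PySem.Str.lower k) src.items := by
      have hk : src.keys = src.items.map (·.1) := rfl
      rw [hk]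
      exact pickScan_eq_scanI src _ hnd src.items (fun p hp => hp)
    simp only [pvPick, pvPickR, hscan]
    cases pvScanI (PySem.Str.lower k) src.items with
    | some v => rfl
    | none => exact ih (i + 1)

theorem scanI_ne_empty (lk : String) (xs : List (String × String)) (v : String)
    (h : pvScanI lk xs = some v) : v ≠ "" := by
  induction xs with
  | nil => simp [pvScanI] at h
  | cons p rest ih =>
    by_cases hc : PySem.Str.lower p.1 = lk ∧ p.2 ≠ ""
    · simp only [pvScanI, if_pos hc] at h
      cases h; exact hc.2
    · simp only [pvScanI, if_neg hc] at h
      exact ih h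

theorem pickR_ne_empty (xs : List (String × String)) :
    ∀ (ks : List String) (i : Int) (rv : Int × String),
      pvPickR xs i ks = some rv → rv.2 ≠ "" := by
  intro ks
  induction ks with
  | nil => intro i rv h; simp [pvPickR] at h
  | cons k rest ih =>
    intro i rv h
    simp only [pvPickR] at h
    cases hs : pvScanI (PySem.Str.lower k) xs with
    | some v => rw [hs] at h; cases h; exact scanI_ne_empty _ _ _ hs
    | none => rw [hs] at h; exact ih (i + 1) rv h

theorem scanIdx_lb (lk : String) :
    ∀ (ks : List String) (i r : Int), pvScanIdx lk i ks = some r → i ≤ r := by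
  intro ks
  induction ks with
  | nil => intro i r h; simp [pvScanIdx] at h
  | cons c rest ih =>
    intro i r h
    simp only [pvScanIdx] at h
    by_cases hc : PySem.Str.lower c = lk
    · rw [if_pos hc] at h; cases h; omega
    · rw [if_neg hc] at h; have := ih (i + 1) r h; omega

theorem pickR_lb (xs : List (String × String)) :
    ∀ (ks : List String) (i : Int) (rv : Int × String), pvPickR xs i ks = some rv → i ≤ rv.1 := by
  intro ks
  induction ks with
  | nil => intro i rv h; simp [pvPickR] at h
  | cons k rest ih =>
    intro i rv h
    simp only [pvPickR] at h
    cases hs : pvScanI (PySem.Str.lower k) xs with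
    | some v => rw [hs] at h; cases h; omega
    | none => rw [hs] at h; have := ih (i + 1) rv h; omega

theorem pickR_nil (ks : List String) (i : Int) : pvPickR [] i ks = none := by
  induction ks generalizing i with
  | nil => rfl
  | cons k rest ih => simp only [pvPickR, pvScanI]; exact ih (i + 1)

theorem scanI_append (lk : String) (xs : List (String × String)) (p : String × String) :
    pvScanI lk (xs ++ [p]) =
      (pvScanI lk xs).or (if PySem.Str.lower p.1 = lk ∧ p.2 ≠ "" then some p.2 else none) := by
  induction xs with
  | nil => simp [pvScanI]
  | cons q rest ih =>
    by_cases hc : PySem.Str.lower q.1 = lk ∧ q.2 ≠ ""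
    · simp [pvScanI, if_pos hc, Option.or]
    · simp only [List.cons_append, pvScanI, if_neg hc]; exact ih

-- appending one data item to the scanned list combines with the item's own hit
theorem pickR_snoc (xs : List (String × String)) (p : String × String) :
    ∀ (ks : List String) (i : Int),
      pvPickR (xs ++ [p]) i ks =
        pvOCombine (pvPickR xs i ks)
          (if p.2 = "" then none
           else (pvScanIdx (PySem.Str.lower p.1) i ks).map (fun r => (r, p.2))) := by
  intro ks
  induction ks with
  | nil =>
    intro i
    simp only [pvPickR, pvScanIdx]
    by_cases hp : p.2 = "" <;> simp [hp, pvOCombine]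
  | cons k rest ih =>
    intro i
    simp only [pvPickR, scanI_append]
    cases hs : pvScanI (PySem.Str.lower k) xs with
    | some v =>
      simp only [Option.some_or]
      by_cases hp : p.2 = ""
      · simp [hp, pvOCombine]
      · rw [if_neg hp]
        cases ho : pvScanIdx (PySem.Str.lower p.1) i (k :: rest) with
        | none => simp [pvOCombine]
        | some r =>
          have hr : i ≤ r := scanIdx_lb _ _ i r ho
          simp [pvOCombine, not_lt.mpr hr]
    | none =>
      simp only [Option.none_or]
      by_cases hcond : PySem.Str.lower p.1 = PySem.Str.lower k ∧ p.2 ≠ ""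
      · rw [if_pos hcond]
        have hsc : pvScanIdx (PySem.Str.lower p.1) i (k :: rest) = some i := by
          simp only [pvScanIdx, if_pos hcond.1.symm]
        rw [if_neg hcond.2, hsc]
        cases h1 : pvPickR xs (i + 1) rest with
        | none => simp [pvOCombine]
        | some rv1 =>
          have hlb : i + 1 ≤ rv1.1 := pickR_lb _ _ (i + 1) rv1 h1
          simp [pvOCombine, show i < rv1.1 by omega]
      · rw [if_neg hcond, ih (i + 1)]
        by_cases hp : p.2 = ""
        · simp [hp]
        · have hk : ¬ PySem.Str.lower k = PySem.Str.lower p.1 := by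
            intro h; exact hcond ⟨h.symm, hp⟩
          rw [if_neg hp, if_neg hp]
          simp only [pvScanIdx, if_neg hk]

-- B's per-field step is exactly the rank-combine, given the reverse-index characterisation
theorem oStep_eq_combine (name : String) (ks : List String)
    (hf : ∀ lk, pvFieldHit name lk = pvScanIdx lk 0 ks)
    (o : Option (Int × String)) (p : String × String) :
    pvOStep name o p =
      pvOCombine o
        (if p.2 = "" then none
         else (pvScanIdx (PySem.Str.lower p.1) 0 ks).map (fun r => (r, p.2))) := by
  unfold pvOStep
  by_cases hp : p.2 = ""
  · simp [hp, pvOCombine]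
  · rw [if_neg hp, if_neg hp, hf]
    cases pvScanIdx (PySem.Str.lower p.1) 0 ks with
    | none => cases o <;> simp [pvOCombine]
    | some r => cases o <;> simp [pvOCombine]

-- B's projected fold computes A's rank-annotated pick
theorem foldl_oStep_eq_pickR (name : String) (ks : List String)
    (hf : ∀ lk, pvFieldHit name lk = pvScanIdx lk 0 ks) :
    ∀ (xs : List (String × String)), xs.foldl (pvOStep name) none = pvPickR xs 0 ks := by
  intro xs
  induction xs using List.reverseRecOn with
  | nil => exact (pickR_nil ks 0).symm
  | append_singleton xs p ih =>
    rw [List.foldl_append, List.foldl_cons, List.foldl_nil, ih,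
      oStep_eq_combine name ks hf, pickR_snoc]

-- per-key projection of B's dict fold
theorem foldl_bstep_get? (name : String) :
    ∀ (xs : List (String × String)) (acc : PySem.Dict String (Int × String)),
      (xs.foldl pvBStep acc).get? name = xs.foldl (pvOStep name) (acc.get? name) := by
  intro xs
  induction xs with
  | nil => intro acc; rfl
  | cons p rest ih =>
    intro acc
    rw [List.foldl_cons, List.foldl_cons, ih]
    congr 1
    unfold pvBStep pvOStep
    by_cases hp : p.2 = ""
    · simp [hp]
    · rw [if_neg hp, if_neg hp]
      unfold pvFieldHit
      cases hr : pvRevD.get? (PySem.Str.lower p.1) with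
      | none => rfl
      | some nr =>
        dsimp only
        by_cases hn : nr.1 = name
        · rw [if_pos hn, ← hn]
          cases hacc : acc.get? nr.1 with
          | none => simp [PySem.Dict.get?_insert_self]
          | some rv =>
            by_cases hlt : nr.2 < rv.1
            · simp [hlt, PySem.Dict.get?_insert_self]
            · simp only [if_neg hlt]
              rw [hacc]
        · rw [if_neg hn]
          have hne : name ≠ nr.1 := fun h => hn h.symm
          cases hacc : acc.get? nr.1 with
          | none => simp [PySem.Dict.get?_insert_of_ne _ _ hne]
          | some rv =>
            by_cases hlt : nr.2 < rv.1
            · simp [hlt, PySem.Dict.get?_insert_of_ne _ _ hne]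
            · simp [hlt]

-- generic: looking a key up in a dict's items and filtering to one field commute (distinct keys)
theorem find_proj (L : List (String × String × Int)) (name lk : String)
    (hnd : (L.map (·.1)).Nodup) :
    (match L.find? (fun e => e.1 == lk) with
     | some e => if e.2.1 = name then some e.2.2 else none
     | none => none)
    = ((L.filter (fun e => e.2.1 == name)).find? (fun e => e.1 == lk)).map (·.2.2) := by
  induction L with
  | nil => rfl
  | cons e L ih =>
    simp only [List.map_cons, List.nodup_cons] at hnd
    by_cases he : e.1 = lk
    · rw [List.find?_cons_of_pos (by simp [he])]
      dsimp only
      by_cases hn : e.2.1 = name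
      · rw [List.filter_cons_of_pos (by simp [hn]),
          List.find?_cons_of_pos (by simp [he])]
        simp [hn]
      · rw [List.filter_cons_of_neg (by simp [hn]), if_neg hn]
        have : (L.filter (fun e => e.2.1 == name)).find? (fun e => e.1 == lk) = none := by
          rw [List.find?_eq_none]
          intro x hx
          have hxL : x ∈ L := List.mem_of_mem_filter hx
          have : x.1 ≠ lk := by
            intro hx1
            apply hnd.1
            rw [he, ← hx1]
            exact List.mem_map_of_mem hxL
          simp [this]
        rw [this]
        rfl
    · rw [List.find?_cons_of_neg (by simp [he])]
      by_cases hn : e.2.1 = name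
      · rw [List.filter_cons_of_pos (by simp [hn]),
          List.find?_cons_of_neg (by simp [he])]
        exact ih hnd.2
      · rw [List.filter_cons_of_neg (by simp [hn])]
        exact ih hnd.2

theorem dict_get?_eq_find? (d : PySem.Dict String (String × Int)) (lk : String) :
    d.get? lk = (d.items.find? (fun e => e.1 == lk)).map (·.2) := by
  obtain ⟨L⟩ := d
  induction L with
  | nil => rfl
  | cons e L ih =>
    obtain ⟨k, v⟩ := e
    rw [PySem.Dict.get?_mk_cons]
    by_cases he : k = lk
    · rw [if_pos (by simp [he]), List.find?_cons_of_pos (by simp [he])]; rfl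
    · rw [if_neg (by simp [he]), List.find?_cons_of_neg (by simp [he])]
      exact ih

-- finding lk among one field's (lowercased candidate, rank) entries is the candidate scan
theorem find_entries_eq_scanIdx (name lk : String) :
    ∀ (ks : List String) (i : Int),
      (((PySem.List.enumerate ks i).map
          (fun e => (PySem.Str.lower e.2, (name, e.1)))).find? (fun e => e.1 == lk)).map (·.2.2)
        = pvScanIdx lk i ks := by
  intro ks
  induction ks with
  | nil => intro i; rfl
  | cons c rest ih =>
    intro i
    rw [PySem.List.enumerate_cons]
    simp only [List.map_cons, pvScanIdx]
    by_cases hc : PySem.Str.lower c = lk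
    · rw [List.find?_cons_of_pos (by simp [hc]), if_pos hc]; rfl
    · rw [List.find?_cons_of_neg (by simp [hc]), if_neg hc]; exact ih (i + 1)

-- the reverse index, restricted to one field of the table, is that field's candidate scan
set_option maxRecDepth 100000 in
theorem fieldHit_eq_scanIdx (name : String) (ks : List String)
    (h : (name, ks) ∈ pvFields) (lk : String) :
    pvFieldHit name lk = pvScanIdx lk 0 ks := by
  have hnd : ((pvRevD.items.map (·.1)).Nodup) := by decide
  unfold pvFieldHit
  rw [dict_get?_eq_find?]
  have hfil : pvRevD.items.filter (fun e => e.2.1 == name)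
      = (PySem.List.enumerate ks).map (fun e => (PySem.Str.lower e.2, (name, e.1))) := by
    fin_cases h <;> decide
  calc (match (pvRevD.items.find? (fun e => e.1 == lk)).map (·.2) with
        | some nr => if nr.1 = name then some nr.2 else none
        | none => none)
      = (match pvRevD.items.find? (fun e => e.1 == lk) with
        | some e => if e.2.1 = name then some e.2.2 else none
        | none => none) := by
        cases pvRevD.items.find? (fun e => e.1 == lk) <;> rfl
    _ = ((pvRevD.items.filter (fun e => e.2.1 == name)).find? (fun e => e.1 == lk)).map (·.2.2) :=
        find_proj _ name lk hnd
    _ = pvScanIdx lk 0 ks := by rw [hfil]; exact find_entries_eq_scanIdx name lk ks 0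

-- per-field agreement of the two ports' entries
theorem field_entry_eq (d : List (String × String)) (name : String) (ks : List String)
    (h : (name, ks) ∈ pvFields) :
    (match pvPick (pvDictOf d) ks with
     | some v => if v ≠ "" then some (name, v) else none
     | none => none)
    = (((pvDictOf d).items.foldl pvBStep PySem.Dict.empty).get? name).map
        (fun rv => (name, rv.2)) := by
  rw [foldl_bstep_get? name _ PySem.Dict.empty]
  rw [show (PySem.Dict.empty : PySem.Dict String (Int × String)).get? name = none from rfl]
  rw [foldl_oStep_eq_pickR name ks (fieldHit_eq_scanIdx name ks h)]
  rw [pick_eq_pickR (pvDictOf d) (pvDictOf_nodup d) ks 0]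
  cases hp : pvPickR (pvDictOf d).items 0 ks with
  | none => rfl
  | some rv =>
    have hne : rv.2 ≠ "" := pickR_ne_empty _ ks 0 rv hp
    simp [hne]

-- ===== VERDICT (by name: the statement is the Claim_ definition above) =====
theorem normalize_metadata_dict_spec : Claim_equal_normalize_metadata_dict := by
  intro d _
  unfold Spec_normalize_metadata_dict normalize_metadata_dict normalize_metadata_dict_alt
  by_cases hd : d = []
  · subst hd; rfl
  · rw [if_neg hd]
    dsimp only
    have hmap : ([("title", pvPick (pvDictOf d) ["TrackName", "Track name", "Title"]),
       ("album", pvPick (pvDictOf d) ["Album"]),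
       ("track", pvPick (pvDictOf d) ["Track", "TrackPosition", "TrackNumber", "Track name/Position"]),
       ("artist", pvPick (pvDictOf d) ["Performer", "Artist", "AlbumArtist", "Author"]),
       ("genre", pvPick (pvDictOf d) ["Genre"]),
       ("year", pvPick (pvDictOf d) ["RecordedDate", "Year", "Date", "DateCreated", "OriginalReleaseDate"]),
       ("comment", pvPick (pvDictOf d) ["Comment"]),
       ("format", pvPick (pvDictOf d) ["Format", "FormatName", "FileType"]),
       ("duration", pvPick (pvDictOf d) ["Duration", "DurationString"]),
       ("bitrate", pvPick (pvDictOf d) ["OverallBitRate", "BitRate"]),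
       ("cover", pvPick (pvDictOf d) ["Cover", "CoverType", "CoverMime", "Picture", "PictureMimeType"]),
       ("source_tool", pvPick (pvDictOf d) ["_source_tool"])])
       = pvFields.map (fun f => (f.1, pvPick (pvDictOf d) f.2)) := by rfl
    rw [hmap, List.filterMap_map]
    apply List.filterMap_congr
    intro f hf
    have h := field_entry_eq d f.1 f.2 (by simpa using hf)
    simpa [Function.comp] using h
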